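-- pv_equiv track=rewrite | github.com/OmBakale2003/power-app-integration | test_scripts/data_transform_test.py | group_by_location
-- ===== SOURCE A (Python) =====
-- from collections import defaultdict
--
-- def normalize(s: str):
--     if s is None:
--         return None
--     s = s.strip().lower()
--     s = s.replace(" ", "")
--     return s
--
-- def extract_location(s: str):
--     if not s or "-" not in s:
--         return None
--
--     _, loc = s.split("-", 1)
--
--     # ignore non-location keywords
--     NON_LOCATION = {
--         "techio",
--         "finance",
--         "commonaccount",
--         "internalsystem",
--         "techtransprojects",
--         "p&c",
--     }
--
--     if loc in NON_LOCATION: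
--         return None
--
--     return loc
--
-- def group_by_location(data):
--     groups = defaultdict(list)
--     seen = set()
--
--     for item in data:
--         norm = normalize(item)
--
--         if norm in seen:
--             continue
--         seen.add(norm)
--
--         loc = extract_location(norm)
--
--         if loc:
--             groups[loc].append(item)
--         else:
--             groups["unknown"].append(item)
--
--     return dict(groups)
-- ===== SOURCE B (Python) =====
-- def normalize(s: str):
--     if s is None:
--         return None
--     s = s.strip().lower()
--     s = s.replace(" ", "")
--     return s
--
-- def extract_location(s: str):
--     if not s or "-" not in s:
--         return None
--     _, loc = s.split("-", 1)
--     NON_LOCATION = {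
--         "techio",
--         "finance",
--         "commonaccount",
--         "internalsystem",
--         "techtransprojects",
--         "p&c",
--     }
--     if loc in NON_LOCATION:
--         return None
--     return loc
--
-- def group_by_location(data):
--     norms = [normalize(x) for x in data]
--     # keep first occurrences only (global first-index test), tagged with the group key
--     pairs = [(extract_location(n) or "unknown", item)
--              for i, (item, n) in enumerate(zip(data, norms))
--              if norms.index(n) == i]
--     # build each group by a per-key filter over the tagged pairs, keys in first-appearance order
--     keys = list(dict.fromkeys(k for k, _ in pairs))
--     return {k: [item for key, item in pairs if key == k] for k in keys}
-- ===== Notes on version B (the rewrite author's own statement) =====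
-- stated objective: alternative
-- what changed: A builds the result in one fused loop appending into a defaultdict while deduping with a seen-set; B instead keeps first occurrences by a global first-index test on the normalized list, tags each survivor with its group key, and constructs each group by a per-key filter inside a dict comprehension over the distinct keys.
import Mathlib
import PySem

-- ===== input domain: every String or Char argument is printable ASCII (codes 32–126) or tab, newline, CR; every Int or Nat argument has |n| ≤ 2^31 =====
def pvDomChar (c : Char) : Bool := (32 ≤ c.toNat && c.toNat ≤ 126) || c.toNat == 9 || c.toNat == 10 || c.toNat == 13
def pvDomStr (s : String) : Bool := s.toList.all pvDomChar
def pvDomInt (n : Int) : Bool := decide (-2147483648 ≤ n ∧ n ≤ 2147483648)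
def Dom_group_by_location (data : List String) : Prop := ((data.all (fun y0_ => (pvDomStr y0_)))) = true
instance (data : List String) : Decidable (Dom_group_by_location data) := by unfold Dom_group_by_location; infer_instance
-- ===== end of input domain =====

-- B replaces A's fused seen-set + defaultdict loop by a first-index dedup test plus per-key filter comprehensions; same return value.


-- ===== PORT A =====
-- normalize (None never occurs here: list elements are strings)
def pvNormalize (s : String) : String :=
  PySem.Str.replace (PySem.Str.lower (PySem.Str.strip s)) " " ""

def pvNonLocation : List String :=
  ["techio", "finance", "commonaccount", "internalsystem", "techtransprojects", "p&c"]

-- extract_location; s.split("-", 1) has exactly two pieces when "-" in s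
def pvExtractLocation (s : String) : Option String :=
  if s = "" || !(PySem.Str.isIn "-" s) then none
  else
    match PySem.Str.splitMax? s "-" 1 with
    | some (_ :: loc :: _) => if pvNonLocation.contains loc then none else some loc
    | _ => none

-- A's loop body: dedup on the normalized form and group into the dict, in one fused step
def pvStepA (st : PySem.Dict String (List String) × PySem.Set String) (item : String) :
    PySem.Dict String (List String) × PySem.Set String :=
  let norm := pvNormalize item
  if st.2.contains norm then st
  else
    let seen := st.2.add norm
    match pvExtractLocation norm with
    | some loc =>
      if loc = "" then (st.1.modify "unknown" [] (· ++ [item]), seen)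
      else (st.1.modify loc [] (· ++ [item]), seen)
    | none => (st.1.modify "unknown" [] (· ++ [item]), seen)

def group_by_location (data : List String) : List (String × List String) :=
  (data.foldl pvStepA (PySem.Dict.empty, PySem.Set.empty)).1.items

-- ===== PORT B =====
-- extract_location(n) or "unknown"
def pvKeyOf (norm : String) : String :=
  match pvExtractLocation norm with
  | some loc => if loc = "" then "unknown" else loc
  | none => "unknown"

-- B's tagged first-occurrence pairs: keep (i, (item, n)) iff norms.index(n) == i
def pvPairs (data : List String) : List (String × String) :=
  let norms := data.map pvNormalize
  (PySem.List.enumerate (data.zip norms) 0).filterMap (fun q =>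
    if (PySem.List.index? norms q.2.2).map (fun (k : Nat) => (k : Int)) = some q.1
    then some (pvKeyOf q.2.2, q.2.1) else none)

def group_by_location_alt (data : List String) : List (String × List String) :=
  let pairs := pvPairs data
  let keys := PySem.List.dedup (pairs.map (·.1))
  (keys.foldl (fun d k =>
      d.insert k ((pairs.filter (fun p => p.1 == k)).map (·.2))) PySem.Dict.empty).items

-- ===== PRECONDITION & SPEC =====
def Spec_group_by_location (data : List String) (out : List (String × List String)) : Prop := out = group_by_location_alt data
instance (data : List String) (out : List (String × List String)) : Decidable (Spec_group_by_location data out) := by unfold Spec_group_by_location; infer_instance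

-- ===== CLAIM (what is proved, stated in full; the proofs are below) =====
def Claim_equal_group_by_location : Prop := ∀ (data : List String), Dom_group_by_location data → Spec_group_by_location data (group_by_location data)

-- ===== LEMMAS AND PROOFS =====

-- the (item, norm) pairs whose normalized form is new, in order (proof-side recursion)
def pvNewPairs (data : List String) (seen : PySem.Set String) : List (String × String) :=
  match data with
  | [] => []
  | item :: rest =>
    let norm := pvNormalize item
    if seen.contains norm then pvNewPairs rest seen
    else (item, norm) :: pvNewPairs rest (seen.add norm)

-- one step of A's fused loop when the normalized form was already seen
theorem pvStepA_skip (g : PySem.Dict String (List String)) (seen : PySem.Set String) (item n : String)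
    (hn : pvNormalize item = n) (hc : seen.contains n = true) :
    pvStepA (g, seen) item = (g, seen) := by
  simp only [pvStepA, hn, hc, if_true]

-- one step of A's fused loop on a fresh normalized form is a modify-append at pvKeyOf
theorem pvStepA_new (g : PySem.Dict String (List String)) (seen : PySem.Set String) (item n : String)
    (hn : pvNormalize item = n) (hc : seen.contains n = false) :
    pvStepA (g, seen) item = (g.modify (pvKeyOf n) [] (· ++ [item]), seen.add n) := by
  simp only [pvStepA, pvKeyOf, hn, hc, Bool.false_eq_true, if_false]
  cases hx : pvExtractLocation n with
  | none => rfl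
  | some loc =>
    by_cases hl : loc = ""
    · simp [hl]
    · simp [hl]

-- A's fused loop equals the modify-append loop over pvNewPairs
theorem pvFused_eq (data : List String) (g : PySem.Dict String (List String)) (seen : PySem.Set String) :
    (data.foldl pvStepA (g, seen)).1 =
      (pvNewPairs data seen).foldl (fun d p => d.modify (pvKeyOf p.2) [] (· ++ [p.1])) g := by
  induction data generalizing g seen with
  | nil => simp [pvNewPairs]
  | cons item rest ih =>
    simp only [List.foldl_cons, pvNewPairs]
    cases hc : seen.contains (pvNormalize item) with
    | true =>
      rw [pvStepA_skip g seen item _ rfl hc]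
      simp only [if_true]
      exact ih g seen
    | false =>
      rw [pvStepA_new g seen item _ rfl hc]
      simp only [Bool.false_eq_true, if_false, List.foldl_cons]
      exact ih _ _

-- B's first-index filter over the full norms list equals pvNewPairs (tagged with pvKeyOf):
-- pre is the list of already-processed normalized forms
theorem pvPairs_gen (rest pre : List String) :
    (PySem.List.enumerate (rest.zip (rest.map pvNormalize)) (pre.length : Int)).filterMap (fun q =>
        if (PySem.List.index? (pre ++ rest.map pvNormalize) q.2.2).map (fun (k : Nat) => (k : Int)) = some q.1
        then some (pvKeyOf q.2.2, q.2.1) else none)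
      = (pvNewPairs rest (PySem.Set.ofList pre)).map (fun p => (pvKeyOf p.2, p.1)) := by
  induction rest generalizing pre with
  | nil => simp [pvNewPairs]
  | cons item rest ih =>
    have hassoc : pre ++ pvNormalize item :: rest.map pvNormalize
        = (pre ++ [pvNormalize item]) ++ rest.map pvNormalize := by simp
    have ih' := ih (pre ++ [pvNormalize item])
    rw [← hassoc] at ih'
    have hlen : ((pre ++ [pvNormalize item]).length : Int) = (pre.length : Int) + 1 := by
      simp
    rw [hlen] at ih'
    simp only [List.map_cons, List.zip_cons_cons, PySem.List.enumerate_cons, List.filterMap_cons]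
    by_cases hmem : pvNormalize item ∈ pre
    · -- already seen: index? finds an earlier position, so the head is dropped
      have hidx : PySem.List.index? (pre ++ pvNormalize item :: rest.map pvNormalize) (pvNormalize item)
          = PySem.List.index? pre (pvNormalize item) :=
        PySem.List.index?_append_of_mem _ hmem
      obtain ⟨k, hk⟩ := Option.isSome_iff_exists.mp ((PySem.List.index?_isSome_iff _ _).mpr hmem)
      have hklt : k < pre.length := by
        obtain ⟨p', s', hps, hlenp, _⟩ := (PySem.List.index?_eq_some_iff _ _ _).mp hk
        subst hps; simp [← hlenp]
      have hif : (if (PySem.List.index? (pre ++ pvNormalize item :: rest.map pvNormalize)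
            (pvNormalize item)).map (fun (k : Nat) => (k : Int)) = some (pre.length : Int)
          then some (pvKeyOf (pvNormalize item), item) else none) = none := by
        rw [if_neg]
        rw [hidx, hk]
        simp
        omega
      simp only [hif]
      have hseen : (PySem.Set.ofList pre).contains (pvNormalize item) = true := by
        simp [PySem.Set.mem_ofList, hmem]
      have hadd : PySem.Set.ofList (pre ++ [pvNormalize item]) = PySem.Set.ofList pre := by
        rw [PySem.Set.ofList_append_singleton, PySem.Set.add_of_mem]
        exact (PySem.Set.mem_ofList _ _).mpr hmem
      rw [hadd] at ih'
      refine ih'.trans ?_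
      simp only [pvNewPairs, hseen, if_true]
    · -- fresh: index? is exactly pre.length, the head is kept
      have hidx : PySem.List.index? (pre ++ pvNormalize item :: rest.map pvNormalize) (pvNormalize item)
          = some pre.length := by
        apply (PySem.List.index?_eq_some_iff _ _ _).mpr
        exact ⟨pre, rest.map pvNormalize, rfl, rfl, hmem⟩
      have hif : (if (PySem.List.index? (pre ++ pvNormalize item :: rest.map pvNormalize)
            (pvNormalize item)).map (fun (k : Nat) => (k : Int)) = some (pre.length : Int)
          then some (pvKeyOf (pvNormalize item), item) else none)
          = some (pvKeyOf (pvNormalize item), item) := by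
        rw [if_pos]
        rw [hidx]
        rfl
      simp only [hif]
      have hseen : (PySem.Set.ofList pre).contains (pvNormalize item) = false := by
        simp [PySem.Set.mem_ofList, hmem]
      rw [PySem.Set.ofList_append_singleton] at ih'
      refine (congrArg _ ih').trans ?_
      simp only [pvNewPairs, hseen, Bool.false_eq_true, if_false, List.map_cons]

theorem pvPairs_eq (data : List String) :
    pvPairs data = (pvNewPairs data PySem.Set.empty).map (fun p => (pvKeyOf p.2, p.1)) := by
  have := pvPairs_gen data []
  simpa [pvPairs] using this

-- a fold inserting distinct fresh keys into an empty dict lists exactly those key/value pairs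
theorem pvItemsFresh (keys : List String) (v : String → List String) (hnd : keys.Nodup) :
    (keys.foldl (fun d k => d.insert k (v k)) PySem.Dict.empty).items
      = keys.map (fun k => (k, v k)) := by
  have h := PySem.Dict.items_foldl_insert_fresh keys (fun a => a) v PySem.Dict.empty
      (fun a _ => by simp) (by simpa using hnd)
  simpa using h

-- ===== VERDICT (by name: the statement is the Claim_ definition above) =====
theorem group_by_location_spec : Claim_equal_group_by_location := by
  intro data _
  unfold Spec_group_by_location group_by_location group_by_location_alt
  rw [pvFused_eq]
  have hfold : (pvNewPairs data PySem.Set.empty).foldl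
      (fun d p => d.modify (pvKeyOf p.2) [] (· ++ [p.1])) PySem.Dict.empty
      = (pvPairs data).foldl (fun d p => d.modify p.1 [] (· ++ [p.2])) PySem.Dict.empty := by
    rw [pvPairs_eq, List.foldl_map]
  rw [hfold]
  have hnd : ((pvPairs data).foldl (fun d p => d.modify p.1 [] (· ++ [p.2]))
      PySem.Dict.empty).keys.Nodup :=
    PySem.Dict.nodup_keys_foldl_modify_key (pvPairs data) Prod.fst [] (fun _ p => (· ++ [p.2])) _
      (by simp [PySem.Dict.keys_empty])
  rw [PySem.Dict.items_eq_map_keys _ hnd []]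
  have hkeys : ((pvPairs data).foldl (fun d p => d.modify p.1 [] (· ++ [p.2]))
      PySem.Dict.empty).keys = PySem.List.dedup ((pvPairs data).map (·.1)) := by
    rw [PySem.Dict.keys_foldl_modify_key]
    simp [PySem.Dict.keys_empty, PySem.Set.update_nil_left]
  rw [hkeys]
  rw [pvItemsFresh _ _ (PySem.List.nodup_dedup ((pvPairs data).map (·.1)))]
  apply List.map_congr_left
  intro k _
  rw [PySem.Dict.getD_foldl_modify_append]
  simp [PySem.Dict.getD_empty]
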